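-- pv_equiv track=rewrite | github.com/romeorizzi/esami-RO-public | problem_types/dp_poldo/yield_long_dp_poldo.py | sol_left_wing
-- ===== SOURCE A (Python) =====
-- def sol_left_wing(pos, monotonia, dp_array, faces_array):
--     assert 0 <= pos < len(dp_array)==len(faces_array)
--     assert dp_array[pos] > 0
--     if dp_array[pos] == 1:
--         return [faces_array[pos]]
--     next_pos = pos-1
--     while next_pos < len(dp_array):
--         if dp_array[next_pos] != dp_array[pos]-1:
--             next_pos -= 1
--         elif faces_array[next_pos] > faces_array[pos] and monotonia in {'SC','ND'}:
--             next_pos -= 1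
--         elif faces_array[next_pos] < faces_array[pos] and monotonia in {'SD','NC'}:
--             next_pos -= 1
--         elif faces_array[next_pos] == faces_array[pos] and monotonia in {'SC','SD'}:
--             next_pos -= 1
--         else:
--             return  sol_left_wing(next_pos, monotonia, dp_array, faces_array) + [faces_array[pos]]
--     assert False
-- ===== SOURCE B (Python) =====
-- def _ok(fj, fi, monotonia):
--     # may position j (value fj) precede position i (value fi) under the monotonicity rule?
--     if fj > fi and monotonia in ('SC', 'ND'):
--         return False
--     if fj < fi and monotonia in ('SD', 'NC'):
--         return False
--     if fj == fi and monotonia in ('SC', 'SD'):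
--         return False
--     return True
--
-- def _pred(pos, monotonia, dp_array, faces_array):
--     # greatest j < pos that is a valid DP predecessor of pos
--     for j in range(pos - 1, -1, -1):
--         if dp_array[j] == dp_array[pos] - 1 and _ok(faces_array[j], faces_array[pos], monotonia):
--             return j
--     raise ValueError("no predecessor")
--
-- def sol_left_wing(pos, monotonia, dp_array, faces_array):
--     assert 0 <= pos < len(dp_array) == len(faces_array)
--     assert dp_array[pos] > 0
--     acc = []
--     while dp_array[pos] != 1:
--         acc.append(faces_array[pos])
--         pos = _pred(pos, monotonia, dp_array, faces_array)
--     acc.append(faces_array[pos])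
--     acc.reverse()
--     return acc
-- ===== Notes on version B (the rewrite author's own statement) =====
-- stated objective: idiomatic
-- what changed: Replaces A's recursion (which prepends the recursive result before appending the current face) by an explicit iterative loop with an accumulator that is reversed at the end, with the backward predecessor search factored into a helper that scans range(pos-1,-1,-1) and so never wanders into negative indices.
-- outside the precondition, e.g. on sol_left_wing(2, 'SC', [1, 2, 2], [0, 0, 1]): A returns [0, 1], B returns [0, 1]
import Mathlib
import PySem

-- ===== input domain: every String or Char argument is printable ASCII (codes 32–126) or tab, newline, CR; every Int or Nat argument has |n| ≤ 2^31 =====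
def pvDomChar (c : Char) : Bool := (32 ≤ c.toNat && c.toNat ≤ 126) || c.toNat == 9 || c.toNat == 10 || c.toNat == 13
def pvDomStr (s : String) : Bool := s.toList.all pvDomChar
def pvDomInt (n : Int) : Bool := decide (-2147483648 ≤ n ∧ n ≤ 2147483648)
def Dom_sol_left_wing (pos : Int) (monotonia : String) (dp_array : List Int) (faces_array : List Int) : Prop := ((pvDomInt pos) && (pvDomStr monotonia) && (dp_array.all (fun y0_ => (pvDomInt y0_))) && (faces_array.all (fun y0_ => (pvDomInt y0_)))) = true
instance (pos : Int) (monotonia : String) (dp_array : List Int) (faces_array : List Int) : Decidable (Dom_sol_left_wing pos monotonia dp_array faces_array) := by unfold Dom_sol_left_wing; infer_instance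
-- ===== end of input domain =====

-- ===== PORT A =====
-- B rewrites A's backward recursion as an iterative loop with an accumulator, reversed at the end (idiomatic; return value only).

-- Termination helpers (cited by name in decreasing_by; kept as lemmas so the
-- compiled definitions stay small)
theorem pvGetLB (xs : List Int) (i : Int) (x : Int)
    (h : PySem.List.pyGet? xs i = some x) : -(xs.length : Int) ≤ i := by
  by_contra hc
  have hn : PySem.List.pyGet? xs i = none := by
    rw [PySem.List.pyGet?_eq_none_iff]; simp [PySem.Raise.InRange]; omega
  simp [hn] at h

theorem pvDecrScan (len : Nat) (np : Int) (h : -(len : Int) ≤ np) :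
    (np - 1 + (len : Int) + 1).toNat < (np + (len : Int) + 1).toNat := by omega

theorem pvDecrOuter (pos np : Int) (h0 : 0 ≤ pos) (h : np ≤ pos - 1) :
    (np + 1).toNat < (pos + 1).toNat := by omega

theorem pvDecrLoop (pos j : Int) (h0 : 0 ≤ j) (h : j ≤ pos - 1) :
    (j + 1).toNat < (pos + 1).toNat := by omega

theorem pvDecrPred (j : Int) (h0 : 0 ≤ j) :
    (j - 1 + 1).toNat < (j + 1).toNat := by omega

-- Inner `while next_pos < len(dp_array)` loop of A: returns `some j` when the `else` branch
-- fires (predecessor found, possibly at a negative, wrapped index), `none` where the Python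
-- raises (IndexError on dp_array[next_pos]/faces_array[next_pos], or the final `assert False`).
-- `aScan_le_start` (below, needed for termination of `sol_left_wing`) bounds the result.
def aScan (monotonia : String) (dp_array faces_array : List Int) (d f : Int) (next_pos : Int) : Option Int :=
  if _hguard : next_pos < (dp_array.length : Int) then
    match _hdj : PySem.List.pyGet? dp_array next_pos with
    | none => none
    | some dj =>
      if dj ≠ d - 1 then aScan monotonia dp_array faces_array d f (next_pos - 1)
      else
        match PySem.List.pyGet? faces_array next_pos with
        | none => none
        | some fj =>
          if fj > f ∧ (monotonia = "SC" ∨ monotonia = "ND") then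
            aScan monotonia dp_array faces_array d f (next_pos - 1)
          else if fj < f ∧ (monotonia = "SD" ∨ monotonia = "NC") then
            aScan monotonia dp_array faces_array d f (next_pos - 1)
          else if fj = f ∧ (monotonia = "SC" ∨ monotonia = "SD") then
            aScan monotonia dp_array faces_array d f (next_pos - 1)
          else some next_pos
  else none
termination_by (next_pos + dp_array.length + 1).toNat
decreasing_by
  all_goals exact pvDecrScan dp_array.length next_pos (pvGetLB dp_array next_pos _ _hdj)

theorem aScan_le_start (monotonia : String) (dp_array faces_array : List Int) (d f : Int)
    (start : Int) : ∀ j, aScan monotonia dp_array faces_array d f start = some j → j ≤ start := by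
  induction start using aScan.induct monotonia dp_array faces_array d f with
  | case1 x hlt hdj => intro j h; rw [aScan, dif_pos hlt] at h; split at h <;> simp_all
  | case2 x hlt dj hdj hne ih =>
    intro j h; rw [aScan, dif_pos hlt] at h; split at h
    · simp_all
    · rename_i dj' hdj'
      rw [hdj] at hdj'; injection hdj' with he; subst he
      rw [if_pos hne] at h; have := ih j h; omega
  | case3 x hlt dj hdj hne hfj =>
    intro j h; rw [aScan, dif_pos hlt] at h; split at h
    · simp_all
    · rename_i dj' hdj'
      rw [hdj] at hdj'; injection hdj' with he; subst he
      rw [if_neg hne] at h; split at h <;> simp_all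
  | case4 x hlt dj hdj hne fj hfj c1 ih =>
    intro j h; rw [aScan, dif_pos hlt] at h; split at h
    · simp_all
    · rename_i dj' hdj'
      rw [hdj] at hdj'; injection hdj' with he; subst he
      rw [if_neg hne] at h; split at h
      · simp_all
      · rename_i fj' hfj'
        rw [hfj] at hfj'; injection hfj' with he2; subst he2
        rw [if_pos c1] at h; have := ih j h; omega
  | case5 x hlt dj hdj hne fj hfj c1 c2 ih =>
    intro j h; rw [aScan, dif_pos hlt] at h; split at h
    · simp_all
    · rename_i dj' hdj'
      rw [hdj] at hdj'; injection hdj' with he; subst he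
      rw [if_neg hne] at h; split at h
      · simp_all
      · rename_i fj' hfj'
        rw [hfj] at hfj'; injection hfj' with he2; subst he2
        rw [if_neg c1, if_pos c2] at h; have := ih j h; omega
  | case6 x hlt dj hdj hne fj hfj c1 c2 c3 ih =>
    intro j h; rw [aScan, dif_pos hlt] at h; split at h
    · simp_all
    · rename_i dj' hdj'
      rw [hdj] at hdj'; injection hdj' with he; subst he
      rw [if_neg hne] at h; split at h
      · simp_all
      · rename_i fj' hfj'
        rw [hfj] at hfj'; injection hfj' with he2; subst he2
        rw [if_neg c1, if_neg c2, if_pos c3] at h; have := ih j h; omega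
  | case7 x hlt dj hdj hne fj hfj c1 c2 c3 =>
    intro j h; rw [aScan, dif_pos hlt] at h; split at h
    · simp_all
    · rename_i dj' hdj'
      rw [hdj] at hdj'; injection hdj' with he; subst he
      rw [if_neg hne] at h; split at h
      · simp_all
      · rename_i fj' hfj'
        rw [hfj] at hfj'; injection hfj' with he2; subst he2
        rw [if_neg c1, if_neg c2, if_neg c3] at h
        injection h with he3; omega
  | case8 x hge => intro j h; rw [aScan, dif_neg hge] at h; simp at h

-- Port of A.  Failed asserts and raised exceptions are rendered as [] (excluded by Pre_).
def sol_left_wing (pos : Int) (monotonia : String) (dp_array : List Int) (faces_array : List Int) : List Int :=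
  if _hassert : 0 <= pos ∧ pos < (dp_array.length : Int) ∧ dp_array.length = faces_array.length then
    match PySem.List.pyGet? dp_array pos with
    | none => []
    | some d =>
      if d > 0 then
        if d = 1 then
          match PySem.List.pyGet? faces_array pos with
          | none => []
          | some f => [f]
        else
          match PySem.List.pyGet? faces_array pos with
          | none => []
          | some f =>
            match _hscan : aScan monotonia dp_array faces_array d f (pos - 1) with
            | none => []   -- `assert False` / IndexError inside the loop
            | some next_pos =>
              sol_left_wing next_pos monotonia dp_array faces_array ++ [f]
      else []   -- assert dp_array[pos] > 0 failed
  else []       -- first assert failed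
termination_by (pos + 1).toNat
decreasing_by
  exact pvDecrOuter pos next_pos _hassert.1
    (aScan_le_start monotonia dp_array faces_array d f (pos - 1) next_pos _hscan)

-- ===== PORT B =====
-- _ok(fj, fi, monotonia) of Source B
def altOk (fj fi : Int) (monotonia : String) : Bool :=
  if fj > fi ∧ (monotonia = "SC" ∨ monotonia = "ND") then false
  else if fj < fi ∧ (monotonia = "SD" ∨ monotonia = "NC") then false
  else if fj = fi ∧ (monotonia = "SC" ∨ monotonia = "SD") then false
  else true

-- _pred's `for j in range(pos-1, -1, -1)` loop of Source B; none = the ValueError it raises.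
def altPred (monotonia : String) (dp_array faces_array : List Int) (pos : Int) (j : Int) : Option Int :=
  if 0 ≤ j then
    if PySem.List.pyGetD dp_array j 0 = PySem.List.pyGetD dp_array pos 0 - 1
        ∧ altOk (PySem.List.pyGetD faces_array j 0) (PySem.List.pyGetD faces_array pos 0) monotonia
    then some j
    else altPred monotonia dp_array faces_array pos (j - 1)
  else none
termination_by (j + 1).toNat
decreasing_by exact pvDecrPred j (by assumption)

theorem altPred_bounds (monotonia : String) (dp_array faces_array : List Int) (pos : Int) :
    ∀ (j0 j : Int), altPred monotonia dp_array faces_array pos j0 = some j → 0 ≤ j ∧ j ≤ j0 := by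
  intro j0
  induction j0 using (fun j0 => altPred.induct monotonia dp_array faces_array pos j0) with
  | case1 j0 h0 hc =>
    intro j h; rw [altPred, if_pos h0, if_pos hc] at h
    simp at h; omega
  | case2 j0 h0 hc ih =>
    intro j h; rw [altPred, if_pos h0, if_neg hc] at h
    have := ih j h; omega
  | case3 j0 h0 =>
    intro j h; rw [altPred, if_neg h0] at h; simp at h

-- the `while dp_array[pos] != 1` loop of Source B, with accumulator `acc`
def altLoop (monotonia : String) (dp_array faces_array : List Int) (pos : Int) (acc : List Int) : List Int :=
  if PySem.List.pyGetD dp_array pos 0 ≠ 1 then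
    match _hp : altPred monotonia dp_array faces_array pos (pos - 1) with
    | some j => altLoop monotonia dp_array faces_array j (acc ++ [PySem.List.pyGetD faces_array pos 0])
    | none => []   -- ValueError from _pred (excluded by Pre_)
  else (acc ++ [PySem.List.pyGetD faces_array pos 0]).reverse
termination_by (pos + 1).toNat
decreasing_by
  obtain ⟨hb1, hb2⟩ := altPred_bounds monotonia dp_array faces_array pos (pos - 1) j _hp
  exact pvDecrLoop pos j hb1 hb2


def sol_left_wing_alt (pos : Int) (monotonia : String) (dp_array : List Int) (faces_array : List Int) : List Int :=
  if 0 <= pos ∧ pos < (dp_array.length : Int) ∧ dp_array.length = faces_array.length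
      ∧ PySem.List.pyGetD dp_array pos 0 > 0 then
    altLoop monotonia dp_array faces_array pos []
  else []   -- an assert of Source B failed

-- ===== PRECONDITION & SPEC =====
-- Accept condition of the scans, restated on Nat indices (used only by Pre_; not by the ports).
def preOk (fj fi : Int) (monotonia : String) : Prop :=
  ¬ (fj > fi ∧ (monotonia = "SC" ∨ monotonia = "ND"))
  ∧ ¬ (fj < fi ∧ (monotonia = "SD" ∨ monotonia = "NC"))
  ∧ ¬ (fj = fi ∧ (monotonia = "SC" ∨ monotonia = "SD"))

-- Pre_ = the asserts of A hold and every position i ≤ pos whose dp level is between 2 and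
-- dp[pos] has a compatible DP predecessor below it.  This closed-form condition guarantees the
-- backward scans succeed, so A returns normally (no IndexError/AssertionError from the
-- negative-index wraparound of its `while next_pos < len(...)` loop).  It is slightly
-- narrower than A's exact success set: A may also return when a position OFF its greedy
-- predecessor path lacks a predecessor (B returns the same value there; see the cite).
def Pre_sol_left_wing (pos : Int) (monotonia : String) (dp_array : List Int) (faces_array : List Int) : Prop :=
  0 ≤ pos ∧ pos < (dp_array.length : Int) ∧ dp_array.length = faces_array.length
  ∧ 1 ≤ dp_array.getD pos.toNat 0
  ∧ ∀ i < dp_array.length, (i : Int) ≤ pos →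
      2 ≤ dp_array.getD i 0 → dp_array.getD i 0 ≤ dp_array.getD pos.toNat 0 →
      ∃ j < i, dp_array.getD j 0 = dp_array.getD i 0 - 1
        ∧ preOk (faces_array.getD j 0) (faces_array.getD i 0) monotonia

instance (pos : Int) (monotonia : String) (dp_array : List Int) (faces_array : List Int) : Decidable (Pre_sol_left_wing pos monotonia dp_array faces_array) := by
  unfold Pre_sol_left_wing preOk
  refine instDecidableAnd (dq := ?_)
  refine instDecidableAnd (dq := ?_)
  refine instDecidableAnd (dq := ?_)
  refine instDecidableAnd (dq := ?_)
  exact Nat.decidableBallLT _ _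

def pvWitness_sol_left_wing : Int × String × List Int × List Int := (2, "SC", [1, 2, 3], [1, 2, 3])

def Spec_sol_left_wing (pos : Int) (monotonia : String) (dp_array : List Int) (faces_array : List Int) (out : List Int) : Prop := out = sol_left_wing_alt pos monotonia dp_array faces_array
instance (pos : Int) (monotonia : String) (dp_array : List Int) (faces_array : List Int) (out : List Int) : Decidable (Spec_sol_left_wing pos monotonia dp_array faces_array out) := by unfold Spec_sol_left_wing; infer_instance

-- ===== CLAIM (what is proved, stated in full; the proofs are below) =====
def Claim_equal_sol_left_wing : Prop := ∀ (pos : Int) (monotonia : String) (dp_array : List Int) (faces_array : List Int), Dom_sol_left_wing pos monotonia dp_array faces_array → Pre_sol_left_wing pos monotonia dp_array faces_array → Spec_sol_left_wing pos monotonia dp_array faces_array (sol_left_wing pos monotonia dp_array faces_array)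

-- ===== LEMMAS AND PROOFS =====

-- "index s is an acceptable predecessor" — A's else-branch condition, on Nat indices
def GoodAt (monotonia : String) (dp_array faces_array : List Int) (d f : Int) (s : Nat) : Prop :=
  dp_array.getD s 0 = d - 1 ∧ preOk (faces_array.getD s 0) f monotonia

theorem altOk_iff_preOk (fj fi : Int) (monotonia : String) :
    altOk fj fi monotonia = true ↔ preOk fj fi monotonia := by
  unfold altOk preOk
  split_ifs with c1 c2 c3 <;> simp_all

theorem pyGet?_getD (xs : List Int) (s : Nat) (hs : s < xs.length) :
    PySem.List.pyGet? xs (s : Int) = some (xs.getD s 0) := by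
  rw [PySem.List.pyGet?_natCast, List.getElem?_eq_getElem hs, List.getD_eq_getElem _ _ hs]

theorem pyGetD_getD (xs : List Int) (s : Nat) :
    PySem.List.pyGetD xs (s : Int) 0 = xs.getD s 0 := by
  rw [PySem.List.pyGetD_natCast]

theorem aScan_found (monotonia : String) (dp_array faces_array : List Int) (d f : Int) (s : Nat)
    (hs : s < dp_array.length) (hsf : s < faces_array.length)
    (hgood : GoodAt monotonia dp_array faces_array d f s) :
    aScan monotonia dp_array faces_array d f (s : Int) = some (s : Int) := by
  obtain ⟨h1, h2, h3, h4⟩ := hgood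
  rw [aScan, dif_pos (by exact_mod_cast hs)]
  split
  · rename_i hdj; rw [pyGet?_getD _ _ hs] at hdj; cases hdj
  · rename_i dj hdj
    rw [pyGet?_getD _ _ hs] at hdj
    have he : dp_array.getD s 0 = dj := Option.some.inj hdj
    rw [if_neg (by simp only [ne_eq, not_not]; omega), pyGet?_getD _ _ hsf]
    split
    · rename_i hfj; cases hfj
    · rename_i fj hfj
      have hef : fj = faces_array.getD s 0 := (Option.some.inj hfj).symm
      subst hef
      rw [if_neg h2, if_neg h3, if_neg h4]

theorem aScan_skip (monotonia : String) (dp_array faces_array : List Int) (d f : Int) (s : Nat)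
    (hs : s < dp_array.length) (hsf : s < faces_array.length)
    (hbad : ¬ GoodAt monotonia dp_array faces_array d f s) :
    aScan monotonia dp_array faces_array d f (s : Int)
      = aScan monotonia dp_array faces_array d f ((s : Int) - 1) := by
  rw [aScan, dif_pos (by exact_mod_cast hs)]
  split
  · rename_i hdj; rw [pyGet?_getD _ _ hs] at hdj; cases hdj
  · rename_i dj hdj
    rw [pyGet?_getD _ _ hs] at hdj
    have he : dp_array.getD s 0 = dj := Option.some.inj hdj
    by_cases h1 : dp_array.getD s 0 = d - 1
    · rw [if_neg (by simp only [ne_eq, not_not]; omega), pyGet?_getD _ _ hsf]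
      have h2 : ¬ preOk (faces_array.getD s 0) f monotonia := fun hp => hbad ⟨h1, hp⟩
      unfold preOk at h2
      split
      · rename_i hfj; cases hfj
      · rename_i fj hfj
        have hef : fj = faces_array.getD s 0 := (Option.some.inj hfj).symm
        subst hef
        by_cases c1 : faces_array.getD s 0 > f ∧ (monotonia = "SC" ∨ monotonia = "ND")
        · rw [if_pos c1]
        · rw [if_neg c1]
          by_cases c2 : faces_array.getD s 0 < f ∧ (monotonia = "SD" ∨ monotonia = "NC")
          · rw [if_pos c2]
          · rw [if_neg c2, if_pos (by tauto)]
    · rw [if_pos (by omega)]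

theorem altPred_found (monotonia : String) (dp_array faces_array : List Int) (pos : Int)
    (d f : Int) (hd : PySem.List.pyGetD dp_array pos 0 = d)
    (hf : PySem.List.pyGetD faces_array pos 0 = f) (s : Nat)
    (hgood : GoodAt monotonia dp_array faces_array d f s) :
    altPred monotonia dp_array faces_array pos (s : Int) = some (s : Int) := by
  obtain ⟨h1, hok⟩ := hgood
  rw [altPred, if_pos (by omega : (0:Int) ≤ (s : Int)), pyGetD_getD, pyGetD_getD, hd, hf,
    if_pos ⟨h1, (altOk_iff_preOk _ _ _).mpr hok⟩]

theorem altPred_skip (monotonia : String) (dp_array faces_array : List Int) (pos : Int)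
    (d f : Int) (hd : PySem.List.pyGetD dp_array pos 0 = d)
    (hf : PySem.List.pyGetD faces_array pos 0 = f) (s : Nat)
    (hbad : ¬ GoodAt monotonia dp_array faces_array d f s) :
    altPred monotonia dp_array faces_array pos (s : Int)
      = altPred monotonia dp_array faces_array pos ((s : Int) - 1) := by
  rw [altPred, if_pos (by omega : (0:Int) ≤ (s : Int)), pyGetD_getD, pyGetD_getD, hd, hf,
    if_neg (fun hc => hbad ⟨hc.1, (altOk_iff_preOk _ _ _).mp hc.2⟩)]

-- Both scans, started at the same index below pos, return the same (greatest) good index,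
-- provided some good index ≤ start exists.
theorem scan_agree (monotonia : String) (dp_array faces_array : List Int)
    (hlen : dp_array.length = faces_array.length) (d f : Int) (pos : Int)
    (hd : PySem.List.pyGetD dp_array pos 0 = d) (hf : PySem.List.pyGetD faces_array pos 0 = f) :
    ∀ (n : Nat) (start : Int), start.toNat ≤ n → start < (dp_array.length : Int) →
    (∃ j : Nat, (j : Int) ≤ start ∧ GoodAt monotonia dp_array faces_array d f j) →
    ∃ g : Nat, (g : Int) ≤ start
      ∧ GoodAt monotonia dp_array faces_array d f g
      ∧ aScan monotonia dp_array faces_array d f start = some (g : Int)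
      ∧ altPred monotonia dp_array faces_array pos start = some (g : Int) := by
  intro n
  induction n with
  | zero =>
    intro start hn hlt ⟨jw, hjle, hjg⟩
    have h0 : (jw : Int) ≥ 0 := by positivity
    have hs0 : start = 0 := by omega
    have hj0 : jw = 0 := by omega
    subst hj0
    refine ⟨0, by omega, hjg, ?_, ?_⟩
    · have := aScan_found monotonia dp_array faces_array d f 0 (by omega) (by omega) hjg
      simpa [hs0] using this
    · have := altPred_found monotonia dp_array faces_array pos d f hd hf 0 hjg
      simpa [hs0] using this
  | succ n ih =>
    intro start hn hlt ⟨jw, hjle, hjg⟩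
    have h0 : (0:Int) ≤ start := le_trans (by positivity) hjle
    have hsval : ((start.toNat : Nat) : Int) = start := by omega
    have hslt : start.toNat < dp_array.length := by omega
    have hsltf : start.toNat < faces_array.length := by omega
    by_cases hg : GoodAt monotonia dp_array faces_array d f start.toNat
    · refine ⟨start.toNat, by omega, hg, ?_, ?_⟩
      · have := aScan_found monotonia dp_array faces_array d f start.toNat hslt hsltf hg
        simpa [hsval] using this
      · have := altPred_found monotonia dp_array faces_array pos d f hd hf start.toNat hg
        simpa [hsval] using this
    · have hjne : jw ≠ start.toNat := fun he => hg (he ▸ hjg)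
      have hjle' : (jw : Int) ≤ start - 1 := by omega
      obtain ⟨g, hg1, hg2, hg3, hg4⟩ :=
        ih (start - 1) (by omega) (by omega) ⟨jw, hjle', hjg⟩
      refine ⟨g, by omega, hg2, ?_, ?_⟩
      · have := aScan_skip monotonia dp_array faces_array d f start.toNat hslt hsltf hg
        rw [hsval] at this; rw [this, hg3]
      · have := altPred_skip monotonia dp_array faces_array pos d f hd hf start.toNat hg
        rw [hsval] at this; rw [this, hg4]

-- One step of A: base case and predecessor step, as equations
theorem sol_base (monotonia : String) (dp_array faces_array : List Int)
    (hlen : dp_array.length = faces_array.length) (p : Nat) (hplen : p < dp_array.length)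
    (hone : dp_array.getD p 0 = 1) :
    sol_left_wing (p : Int) monotonia dp_array faces_array = [faces_array.getD p 0] := by
  have hpf : p < faces_array.length := by omega
  rw [sol_left_wing, dif_pos ⟨by omega, by exact_mod_cast hplen, hlen⟩]
  split
  · rename_i hdj; rw [pyGet?_getD _ _ hplen] at hdj; cases hdj
  · rename_i dj hdj
    rw [pyGet?_getD _ _ hplen] at hdj
    have he : dp_array.getD p 0 = dj := Option.some.inj hdj
    rw [if_pos (by omega), if_pos (by omega)]
    split
    · rename_i hfj; rw [pyGet?_getD _ _ hpf] at hfj; cases hfj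
    · rename_i fj hfj
      rw [pyGet?_getD _ _ hpf] at hfj
      have hef : faces_array.getD p 0 = fj := Option.some.inj hfj
      rw [hef]

theorem sol_step (monotonia : String) (dp_array faces_array : List Int)
    (hlen : dp_array.length = faces_array.length) (p g : Nat) (hplen : p < dp_array.length)
    (hd1 : 1 ≤ dp_array.getD p 0) (hone : dp_array.getD p 0 ≠ 1)
    (hA : aScan monotonia dp_array faces_array (dp_array.getD p 0) (faces_array.getD p 0)
            ((p : Int) - 1) = some (g : Int)) :
    sol_left_wing (p : Int) monotonia dp_array faces_array
      = sol_left_wing (g : Int) monotonia dp_array faces_array ++ [faces_array.getD p 0] := by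
  have hpf : p < faces_array.length := by omega
  rw [sol_left_wing, dif_pos ⟨by omega, by exact_mod_cast hplen, hlen⟩]
  split
  · rename_i hdj; rw [pyGet?_getD _ _ hplen] at hdj; cases hdj
  · rename_i dj hdj
    rw [pyGet?_getD _ _ hplen] at hdj
    have he : dp_array.getD p 0 = dj := Option.some.inj hdj
    rw [if_pos (by omega), if_neg (by omega)]
    split
    · rename_i hfj; rw [pyGet?_getD _ _ hpf] at hfj; cases hfj
    · rename_i fj hfj
      rw [pyGet?_getD _ _ hpf] at hfj
      have hef : faces_array.getD p 0 = fj := Option.some.inj hfj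
      split
      · rename_i hscan
        rw [← he, ← hef] at hscan
        rw [hscan] at hA; cases hA
      · rename_i np hscan
        rw [← he, ← hef] at hscan
        rw [hscan] at hA
        have hnp : np = (g : Int) := Option.some.inj hA
        rw [hnp, hef]

-- Outer loop equivalence: under the Pre_ invariant at p, B's loop returns A's result
-- followed by the reversed accumulator.
theorem loop_agree (monotonia : String) (dp_array faces_array : List Int)
    (hlen : dp_array.length = faces_array.length) :
    ∀ (n : Nat) (p : Nat), p ≤ n → p < dp_array.length →
    1 ≤ dp_array.getD p 0 →
    (∀ i < dp_array.length, i ≤ p →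
      2 ≤ dp_array.getD i 0 → dp_array.getD i 0 ≤ dp_array.getD p 0 →
      ∃ j < i, dp_array.getD j 0 = dp_array.getD i 0 - 1
        ∧ preOk (faces_array.getD j 0) (faces_array.getD i 0) monotonia) →
    ∀ acc : List Int,
      altLoop monotonia dp_array faces_array (p : Int) acc
        = sol_left_wing (p : Int) monotonia dp_array faces_array ++ acc.reverse := by
  intro n
  induction n with
  | zero =>
    intro p hpn hplen hd1 hinv acc
    -- p = 0: dp.getD 0 must be 1, else the invariant would demand a predecessor below 0
    have hp0 : p = 0 := by omega
    subst hp0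
    have hone : dp_array.getD 0 0 = 1 := by
      by_contra hne
      obtain ⟨j, hj, -⟩ := hinv 0 hplen le_rfl (by omega) le_rfl
      omega
    rw [altLoop, if_neg (by rw [pyGetD_getD]; omega), pyGetD_getD,
      sol_base monotonia dp_array faces_array hlen 0 hplen hone]
    simp
  | succ n ih =>
    intro p hpn hplen hd1 hinv acc
    by_cases hone : dp_array.getD p 0 = 1
    · rw [altLoop, if_neg (by rw [pyGetD_getD]; omega), pyGetD_getD,
        sol_base monotonia dp_array faces_array hlen p hplen hone]
      simp
    · -- dp.getD p ≥ 2: both sides take one predecessor step, to the same index g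
      obtain ⟨jw, hjw, hjdp, hjok⟩ := hinv p hplen le_rfl (by omega) le_rfl
      obtain ⟨g, hgle, hggood, hA, hB⟩ :=
        scan_agree monotonia dp_array faces_array hlen
          (dp_array.getD p 0) (faces_array.getD p 0) (p : Int)
          (pyGetD_getD _ _) (pyGetD_getD _ _) p ((p : Int) - 1)
          (by omega) (by omega)
          ⟨jw, by omega, hjdp, hjok⟩
      have hglen : g < dp_array.length := by omega
      have hgdp : dp_array.getD g 0 = dp_array.getD p 0 - 1 := hggood.1
      rw [altLoop, if_pos (by rw [pyGetD_getD]; omega)]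
      split
      · rename_i j hj
        rw [hj] at hB
        have hjg : j = (g : Int) := Option.some.inj hB
        subst hjg
        rw [pyGetD_getD]
        rw [ih g (by omega) hglen (by omega)
          (fun i hi hig h2 hle => hinv i hi (by omega) h2 (by omega)) (acc ++ [faces_array.getD p 0])]
        rw [sol_step monotonia dp_array faces_array hlen p g hplen hd1 hone hA]
        simp
      · rename_i hj
        rw [hj] at hB; cases hB

-- ===== VERDICT (by name: the statement is the Claim_ definition above) =====
theorem sol_left_wing_spec : Claim_equal_sol_left_wing := by
  intro pos monotonia dp_array faces_array _hdom hpre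
  obtain ⟨h0, hlt, hlen, hd1, hall⟩ := hpre
  unfold Spec_sol_left_wing
  have hpn : pos = ((pos.toNat : Nat) : Int) := by omega
  rw [sol_left_wing_alt, if_pos ⟨h0, hlt, hlen, by rw [hpn, pyGetD_getD]; omega⟩]
  rw [hpn]
  rw [loop_agree monotonia dp_array faces_array hlen pos.toNat pos.toNat le_rfl (by omega) hd1
    (by intro i hi hip; exact hall i hi (by omega)) []]
  simp
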